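-- pv_equiv track=rewrite | github.com/hanzhenzhujene/summa-virtue-alignment | src/summa_moral_graph/sft/reporting.py | _summarize_goal_demo_rows
-- ===== SOURCE A (Python) =====
-- from typing import Any, cast
--
-- def _summarize_goal_demo_rows(rows: list[dict[str, Any]]) -> dict[str, int]:
--     return {
--         "total": len(rows),
--         "base_exact_count": sum(1 for row in rows if bool(row.get("base_exact_match"))),
--         "adapter_exact_count": sum(1 for row in rows if bool(row.get("adapter_exact_match"))),
--         "adapter_only_wins": sum(
--             1
--             for row in rows
--             if bool(row.get("adapter_exact_match")) and not bool(row.get("base_exact_match"))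
--         ),
--         "both_miss": sum(
--             1
--             for row in rows
--             if not bool(row.get("adapter_exact_match")) and not bool(row.get("base_exact_match"))
--         ),
--     }
-- ===== SOURCE B (Python) =====
-- def _summarize_goal_demo_rows(rows):
--     base = adapter = wins = miss = 0
--     for row in rows:
--         b = bool(row.get("base_exact_match"))
--         a = bool(row.get("adapter_exact_match"))
--         if b:
--             base += 1
--         if a:
--             adapter += 1
--         if a and not b:
--             wins += 1
--         if not a and not b:
--             miss += 1
--     return {
--         "total": len(rows),
--         "base_exact_count": base,
--         "adapter_exact_count": adapter,
--         "adapter_only_wins": wins,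
--         "both_miss": miss,
--     }
-- ===== Notes on version B (the rewrite author's own statement) =====
-- stated objective: alternative
-- what changed: Replaced A's four independent generator passes over rows by one explicit loop maintaining four running counters.
import Mathlib
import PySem

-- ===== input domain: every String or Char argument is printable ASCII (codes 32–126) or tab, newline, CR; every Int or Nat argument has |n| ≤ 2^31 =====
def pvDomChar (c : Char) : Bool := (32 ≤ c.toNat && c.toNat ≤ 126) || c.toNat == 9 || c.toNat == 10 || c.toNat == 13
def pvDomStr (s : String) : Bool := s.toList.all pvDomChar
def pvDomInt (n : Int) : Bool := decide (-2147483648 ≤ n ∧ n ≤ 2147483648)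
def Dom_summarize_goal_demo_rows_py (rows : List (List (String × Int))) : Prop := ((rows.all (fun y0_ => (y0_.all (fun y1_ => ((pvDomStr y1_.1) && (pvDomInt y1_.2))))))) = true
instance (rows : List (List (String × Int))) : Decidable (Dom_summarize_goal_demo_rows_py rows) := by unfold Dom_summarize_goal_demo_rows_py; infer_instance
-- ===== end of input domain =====

-- B fuses A's four independent passes over rows into one explicit loop maintaining four running counters (alternative decomposition, same cost).

-- shared helper: bool(row.get(key)) — missing key or value 0 is falsy
def pvTruthy (row : List (String × Int)) (key : String) : Bool :=
  match (PySem.Dict.ofList row).get? key with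
  | some v => v != 0
  | none => false

-- ===== PORT A =====
def summarize_goal_demo_rows_py (rows : List (List (String × Int))) : List (String × Int) :=
  [ ("total", (rows.length : Int)),
    ("base_exact_count", rows.foldl (fun acc row => if pvTruthy row "base_exact_match" then acc + 1 else acc) (0 : Int)),
    ("adapter_exact_count", rows.foldl (fun acc row => if pvTruthy row "adapter_exact_match" then acc + 1 else acc) (0 : Int)),
    ("adapter_only_wins", rows.foldl (fun acc row => if pvTruthy row "adapter_exact_match" && !pvTruthy row "base_exact_match" then acc + 1 else acc) (0 : Int)),
    ("both_miss", rows.foldl (fun acc row => if !pvTruthy row "adapter_exact_match" && !pvTruthy row "base_exact_match" then acc + 1 else acc) (0 : Int)) ]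

-- ===== PORT B =====
def pvStep (acc : Int × Int × Int × Int) (row : List (String × Int)) : Int × Int × Int × Int :=
  let b := pvTruthy row "base_exact_match"
  let a := pvTruthy row "adapter_exact_match"
  let base := if b then acc.1 + 1 else acc.1
  let adapter := if a then acc.2.1 + 1 else acc.2.1
  let wins := if a && !b then acc.2.2.1 + 1 else acc.2.2.1
  let miss := if !a && !b then acc.2.2.2 + 1 else acc.2.2.2
  (base, adapter, wins, miss)

def summarize_goal_demo_rows_py_alt (rows : List (List (String × Int))) : List (String × Int) :=
  let c := rows.foldl pvStep (0, 0, 0, 0)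
  [ ("total", (rows.length : Int)),
    ("base_exact_count", c.1),
    ("adapter_exact_count", c.2.1),
    ("adapter_only_wins", c.2.2.1),
    ("both_miss", c.2.2.2) ]

-- ===== PRECONDITION & SPEC =====
def Spec_summarize_goal_demo_rows_py (rows : List (List (String × Int))) (out : List (String × Int)) : Prop := out = summarize_goal_demo_rows_py_alt rows
instance (rows : List (List (String × Int))) (out : List (String × Int)) : Decidable (Spec_summarize_goal_demo_rows_py rows out) := by unfold Spec_summarize_goal_demo_rows_py; infer_instance

-- ===== CLAIM (what is proved, stated in full; the proofs are below) =====
def Claim_equal_summarize_goal_demo_rows_py : Prop := ∀ (rows : List (List (String × Int))), Dom_summarize_goal_demo_rows_py rows → Spec_summarize_goal_demo_rows_py rows (summarize_goal_demo_rows_py rows)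

-- ===== LEMMAS AND PROOFS =====
theorem pvCount_from (p : List (String × Int) → Bool) (rows : List (List (String × Int))) (n : Int) :
    rows.foldl (fun acc row => if p row then acc + 1 else acc) n
      = n + rows.foldl (fun acc row => if p row then acc + 1 else acc) 0 := by
  induction rows generalizing n with
  | nil => simp
  | cons r rs ih =>
    simp only [List.foldl_cons]
    rw [ih, ih (if p r then 0 + 1 else 0)]
    split_ifs <;> ring

theorem pvStep_foldl_gen (rows : List (List (String × Int))) (acc : Int × Int × Int × Int) :
    rows.foldl pvStep acc
      = (acc.1 + rows.foldl (fun acc row => if pvTruthy row "base_exact_match" then acc + 1 else acc) (0 : Int),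
         acc.2.1 + rows.foldl (fun acc row => if pvTruthy row "adapter_exact_match" then acc + 1 else acc) (0 : Int),
         acc.2.2.1 + rows.foldl (fun acc row => if pvTruthy row "adapter_exact_match" && !pvTruthy row "base_exact_match" then acc + 1 else acc) (0 : Int),
         acc.2.2.2 + rows.foldl (fun acc row => if !pvTruthy row "adapter_exact_match" && !pvTruthy row "base_exact_match" then acc + 1 else acc) (0 : Int)) := by
  induction rows generalizing acc with
  | nil => simp
  | cons r rs ih =>
    simp only [List.foldl_cons]
    rw [ih]
    rw [pvCount_from (fun row => pvTruthy row "base_exact_match") rs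
          (if pvTruthy r "base_exact_match" then (0:Int) + 1 else 0),
        pvCount_from (fun row => pvTruthy row "adapter_exact_match") rs
          (if pvTruthy r "adapter_exact_match" then (0:Int) + 1 else 0),
        pvCount_from (fun row => pvTruthy row "adapter_exact_match" && !pvTruthy row "base_exact_match") rs
          (if pvTruthy r "adapter_exact_match" && !pvTruthy r "base_exact_match" then (0:Int) + 1 else 0),
        pvCount_from (fun row => !pvTruthy row "adapter_exact_match" && !pvTruthy row "base_exact_match") rs
          (if !pvTruthy r "adapter_exact_match" && !pvTruthy r "base_exact_match" then (0:Int) + 1 else 0)]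
    simp only [pvStep, Prod.mk.injEq]
    refine ⟨?_, ?_, ?_, ?_⟩ <;> split_ifs <;> ring

-- ===== VERDICT (by name: the statement is the Claim_ definition above) =====
theorem summarize_goal_demo_rows_py_spec : Claim_equal_summarize_goal_demo_rows_py := by
  intro rows _
  unfold Spec_summarize_goal_demo_rows_py summarize_goal_demo_rows_py summarize_goal_demo_rows_py_alt
  rw [pvStep_foldl_gen]
  norm_num
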